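-- pv_equiv track=rewrite | github.com/IIS-ZPI/ZPI2020_IO1_Spaghetti | api/currency_management.py | count_rises
-- ===== SOURCE A (Python) =====
-- def count_rises(values):
--     in_rise = False
--     rises = 0
--     prev = None
--     for value in values:
--         if prev is not None:
--             if value > prev and not in_rise:
--                 rises += 1
--                 in_rise = True
--             elif value <= prev:
--                 in_rise = False
--
--         prev = value
--
--     return rises
-- ===== SOURCE B (Python) =====
-- def count_rises(values):
--     # Segment the sequence into maximal strictly increasing runs (nested index
--     # loops); a "rise" is exactly a maximal run of length >= 2.
--     vs = list(values)
--     n = len(vs)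
--     runs = 0
--     i = 0
--     while i < n:
--         j = i + 1
--         while j < n and vs[j] > vs[j - 1]:
--             j += 1
--         if j - i >= 2:
--             runs += 1
--         i = j
--     return runs
-- ===== Notes on version B (the rewrite author's own statement) =====
-- stated objective: alternative
-- what changed: Replaces A's single streaming pass with an in_rise boolean flag by run segmentation: an outer index loop jumps from one maximal strictly increasing run to the next (inner scan finds the run's end) and counts runs of length >= 2.
import Mathlib
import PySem

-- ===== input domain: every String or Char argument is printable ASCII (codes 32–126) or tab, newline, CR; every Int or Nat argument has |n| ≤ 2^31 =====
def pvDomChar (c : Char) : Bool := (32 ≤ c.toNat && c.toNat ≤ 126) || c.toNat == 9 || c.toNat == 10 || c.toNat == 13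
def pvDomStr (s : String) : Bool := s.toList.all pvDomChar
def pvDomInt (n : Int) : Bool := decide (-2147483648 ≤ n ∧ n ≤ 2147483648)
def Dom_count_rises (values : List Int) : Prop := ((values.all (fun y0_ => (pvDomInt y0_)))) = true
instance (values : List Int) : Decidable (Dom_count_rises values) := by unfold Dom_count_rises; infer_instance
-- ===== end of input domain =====

-- B replaces A's single streaming pass (in_rise flag) by run segmentation: an
-- outer index loop hops from one maximal strictly increasing run to the next
-- and counts runs of length ≥ 2; alternative decomposition, same cost.

-- ===== PORT A =====
-- one fold over values carrying (in_rise, rises, prev), as in A's loop body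
def pvStepA (s : Bool × Int × Option Int) (value : Int) : Bool × Int × Option Int :=
  match s.2.2 with
  | some prev =>
    if value > prev ∧ ¬ s.1 = true then (true, s.2.1 + 1, some value)
    else if value ≤ prev then (false, s.2.1, some value)
    else (s.1, s.2.1, some value)
  | none => (s.1, s.2.1, some value)

def count_rises (values : List Int) : Int :=
  (values.foldl pvStepA (false, 0, none)).2.1

-- ===== PORT B =====
-- inner while: j advances while j < n and vs[j] > vs[j-1] (indices in range)
def pvScan (vs : List Int) (n j : Nat) : Nat :=
  if h : j < n ∧ vs.getD j 0 > vs.getD (j - 1) 0 then pvScan vs n (j + 1) else j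
termination_by n - j
decreasing_by omega

-- cited by pvOuter's decreasing_by
theorem pvScan_ge (vs : List Int) (n j : Nat) : j ≤ pvScan vs n j := by
  unfold pvScan
  split
  · have := pvScan_ge vs n (j + 1); omega
  · exact Nat.le_refl j
termination_by n - j
decreasing_by omega

-- outer while: i hops to the end of each maximal run, counting runs of length ≥ 2
def pvOuter (vs : List Int) (n i : Nat) (runs : Int) : Int :=
  if h : i < n then
    let j := pvScan vs n (i + 1)
    pvOuter vs n j (if 2 ≤ j - i then runs + 1 else runs)
  else runs
termination_by n - i
decreasing_by have := pvScan_ge vs n (i + 1); omega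

def count_rises_alt (values : List Int) : Int :=
  pvOuter values values.length 0 0

-- ===== PRECONDITION & SPEC =====
def Spec_count_rises (values : List Int) (out : Int) : Prop := out = count_rises_alt values
instance (values : List Int) (out : Int) : Decidable (Spec_count_rises values out) := by unfold Spec_count_rises; infer_instance

-- ===== CLAIM (what is proved, stated in full; the proofs are below) =====
def Claim_equal_count_rises : Prop := ∀ (values : List Int), Dom_count_rises values → Spec_count_rises values (count_rises values)

-- ===== LEMMAS AND PROOFS =====

-- length of the strictly increasing continuation after prev
def ascRun : Int → List Int → Nat
  | _, [] => 0
  | p, x :: xs => if x > p then 1 + ascRun x xs else 0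

-- number of maximal strictly increasing runs of length ≥ 2
def segCount : List Int → Int
  | [] => 0
  | x :: xs =>
    (if 1 ≤ ascRun x xs then 1 else 0) + segCount (xs.drop (ascRun x xs))
termination_by l => l.length
decreasing_by simp only [List.length_drop, List.length_cons]; omega

-- A's loop body as structural recursion on the remaining list
def pvA (p : Int) (inRise : Bool) : List Int → Int
  | [] => 0
  | x :: xs =>
    if x > p ∧ ¬ inRise = true then 1 + pvA x true xs
    else if x ≤ p then pvA x false xs
    else pvA x inRise xs

theorem segCount_nil : segCount [] = 0 := by rw [segCount]

theorem segCount_cons (x : Int) (xs : List Int) :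
    segCount (x :: xs) = (if 1 ≤ ascRun x xs then 1 else 0) + segCount (xs.drop (ascRun x xs)) := by
  rw [segCount]

theorem ascRun_le (p : Int) (xs : List Int) : ascRun p xs ≤ xs.length := by
  induction xs generalizing p with
  | nil => simp [ascRun]
  | cons x xs ih =>
    simp only [ascRun]
    split
    · have := ih x; simp; omega
    · simp

theorem pvFold_eq_pvA (xs : List Int) (p : Int) (inRise : Bool) (cnt : Int) :
    (xs.foldl pvStepA (inRise, cnt, some p)).2.1 = cnt + pvA p inRise xs := by
  induction xs generalizing p inRise cnt with
  | nil => simp [pvA]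
  | cons x xs ih =>
    rw [List.foldl_cons]
    by_cases h1 : x > p
    · by_cases h2 : inRise = true
      · have hstep : pvStepA (inRise, cnt, some p) x = (inRise, cnt, some x) := by
          simp [pvStepA, h2]; omega
        rw [hstep, ih x inRise cnt]
        simp [pvA, h1, h2]
      · have hb : inRise = false := by cases inRise <;> simp_all
        have hstep : pvStepA (inRise, cnt, some p) x = (true, cnt + 1, some x) := by
          simp [pvStepA, hb, h1]
        rw [hstep, ih x true (cnt + 1)]
        simp [pvA, h1, hb]; ring
    · have hle : x ≤ p := by omega
      have hstep : pvStepA (inRise, cnt, some p) x = (false, cnt, some x) := by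
        simp [pvStepA, h1, hle]
      rw [hstep, ih x false cnt]
      simp [pvA, h1, hle]

theorem pvA_true (p : Int) (xs : List Int) :
    pvA p true xs = segCount (xs.drop (ascRun p xs)) := by
  induction xs generalizing p with
  | nil => simp [pvA, ascRun, segCount]
  | cons x xs ih =>
    by_cases h : x > p
    · have hs : pvA p true (x :: xs) = pvA x true xs := by
        simp [pvA, h]
      have ha : ascRun p (x :: xs) = 1 + ascRun x xs := by simp [ascRun, h]
      rw [hs, ih x, ha, show 1 + ascRun x xs = ascRun x xs + 1 from by omega,
        List.drop_succ_cons]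
    · have hle : x ≤ p := by omega
      have h1 : pvA p true (x :: xs) = pvA x false xs := by
        simp [pvA, h, hle]
      have h2 : pvA x false xs = (if 1 ≤ ascRun x xs then 1 else 0) + pvA x true xs := by
        cases xs with
        | nil => simp [pvA, ascRun]
        | cons y ys =>
          by_cases hy : y > x
          · simp [pvA, ascRun, hy]
          · have : y ≤ x := by omega
            simp [pvA, ascRun, hy, this]
      have ha : ascRun p (x :: xs) = 0 := by simp [ascRun, h]
      rw [h1, h2, ih x, ha, List.drop_zero, segCount_cons]

theorem pvA_false (p : Int) (xs : List Int) :
    pvA p false xs = segCount (p :: xs) := by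
  have h2 : pvA p false xs = (if 1 ≤ ascRun p xs then 1 else 0) + pvA p true xs := by
    cases xs with
    | nil => simp [pvA, ascRun]
    | cons y ys =>
      by_cases hy : y > p
      · simp [pvA, ascRun, hy]
      · have : y ≤ p := by omega
        simp [pvA, ascRun, hy, this]
  rw [h2, pvA_true, segCount_cons]

theorem drop_cons_getD (vs : List Int) (i : Nat) (h : i < vs.length) :
    vs.drop i = vs.getD i 0 :: vs.drop (i + 1) := by
  rw [List.getD_eq_getElem vs 0 h]
  exact List.drop_eq_getElem_cons h

theorem pvScan_eq (vs : List Int) (j : Nat) (h1 : 1 ≤ j) (h2 : j ≤ vs.length) :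
    pvScan vs vs.length j = j + ascRun (vs.getD (j - 1) 0) (vs.drop j) := by
  unfold pvScan
  split
  · rename_i h
    have hj : j < vs.length := h.1
    rw [pvScan_eq vs (j + 1) (by omega) (by omega)]
    have hd : j + 1 - 1 = j := by omega
    rw [hd, drop_cons_getD vs j hj]
    simp only [ascRun, if_pos h.2]
    omega
  · rename_i h
    by_cases hj : j < vs.length
    · have hno : ¬ vs.getD j 0 > vs.getD (j - 1) 0 := fun hc => h ⟨hj, hc⟩
      rw [drop_cons_getD vs j hj]
      simp only [ascRun]
      rw [if_neg hno]
      omega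
    · have hd : vs.drop j = [] := List.drop_eq_nil_of_le (by omega)
      rw [hd]; simp [ascRun]
termination_by vs.length - j
decreasing_by omega

theorem pvOuter_eq (vs : List Int) (i : Nat) (hi : i ≤ vs.length) (runs : Int) :
    pvOuter vs vs.length i runs = runs + segCount (vs.drop i) := by
  unfold pvOuter
  split
  · rename_i h
    have hscan := pvScan_eq vs (i + 1) (by omega) (by omega)
    have hk : i + 1 - 1 = i := by omega
    rw [hk] at hscan
    set k := ascRun (vs.getD i 0) (vs.drop (i + 1)) with hkdef
    have hkle : k ≤ vs.length - (i + 1) := by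
      have := ascRun_le (vs.getD i 0) (vs.drop (i + 1))
      simpa using this
    simp only [hscan]
    rw [pvOuter_eq vs (i + 1 + k) (by omega)]
    have hdrop : vs.drop i = vs.getD i 0 :: vs.drop (i + 1) := drop_cons_getD vs i h
    have hseg : segCount (vs.drop i)
        = (if 1 ≤ k then 1 else 0) + segCount ((vs.drop (i + 1)).drop k) := by
      rw [hdrop, segCount_cons, ← hkdef]
    rw [List.drop_drop] at hseg
    have harith : i + 1 + k - i = 1 + k := by omega
    rw [harith]
    have hcond : (2 ≤ 1 + k) ↔ (1 ≤ k) := by omega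
    by_cases hk1 : 1 ≤ k
    · rw [if_pos (hcond.mpr hk1)]
      rw [if_pos hk1] at hseg
      rw [hseg]; ring
    · rw [if_neg (fun hc => hk1 (hcond.mp hc))]
      rw [if_neg hk1] at hseg
      rw [hseg]; ring
  · rename_i h
    have hd : vs.drop i = [] := List.drop_eq_nil_of_le (by omega)
    rw [hd, segCount_nil]; ring
termination_by vs.length - i
decreasing_by have := pvScan_ge vs vs.length (i + 1); omega

-- ===== VERDICT (by name: the statement is the Claim_ definition above) =====
theorem count_rises_spec : Claim_equal_count_rises := by
  intro values _
  unfold Spec_count_rises count_rises count_rises_alt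
  rw [pvOuter_eq values 0 (by omega) 0]
  cases values with
  | nil => simp [segCount_nil]
  | cons x xs =>
    rw [List.foldl_cons]
    have hstep : pvStepA (false, 0, none) x = (false, 0, some x) := by simp [pvStepA]
    rw [hstep, pvFold_eq_pvA xs x false 0, pvA_false]
    simp
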